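-- pv_equiv track=rewrite | github.com/lisperz/Test1-frazo | auto_refactor.py | split_routes_further
-- ===== SOURCE A (Python) =====
-- from typing import List, Tuple
--
-- def split_routes_further(routes_content: str, max_lines: int = 250) -> List[Tuple[str, str]]:
--     """Split routes into multiple files if too long"""
--     lines = routes_content.split('\n')
--
--     if len(lines) <= max_lines:
--         return [('routes', routes_content)]
--
--     # Split by route functions
--     route_files = []
--     current_file = []
--     current_name = 'routes_part1'
--     part_num = 1
--
--     in_route = False
--     route_buffer = []
--
--     for line in lines:
--         if line.strip().startswith('@router.'):
--             if route_buffer and len(current_file) + len(route_buffer) > max_lines: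
--                 # Save current file
--                 route_files.append((current_name, '\n'.join(current_file)))
--                 current_file = []
--                 part_num += 1
--                 current_name = f'routes_part{part_num}'
--
--             if route_buffer:
--                 current_file.extend(route_buffer)
--                 route_buffer = []
--
--             in_route = True
--
--         if in_route:
--             route_buffer.append(line)
--         else:
--             current_file.append(line)
--
--     # Add remaining content
--     if route_buffer:
--         current_file.extend(route_buffer)
--
--     if current_file:
--         route_files.append((current_name, '\n'.join(current_file)))
--
--     return route_files
-- ===== SOURCE B (Python) =====
-- from typing import List, Tuple
--
-- def split_routes_further(routes_content: str, max_lines: int = 250) -> List[Tuple[str, str]]: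
--     """Split routes into multiple files if too long (parse-then-pack decomposition)."""
--     lines = routes_content.split('\n')
--     if len(lines) <= max_lines:
--         return [('routes', routes_content)]
--
--     def is_marker(l):
--         return l.strip().startswith('@router.')
--
--     # Phase 1: parse into preamble + one block per '@router.' line
--     i = 0
--     preamble = []
--     while i < len(lines) and not is_marker(lines[i]):
--         preamble.append(lines[i])
--         i += 1
--     blocks = []
--     while i < len(lines):
--         blk = [lines[i]]
--         i += 1
--         while i < len(lines) and not is_marker(lines[i]):
--             blk.append(lines[i])
--             i += 1
--         blocks.append(blk)
--
--     # Phase 2: greedy packing (the last block is merged without a size check, as in A)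
--     parts = []
--     current = preamble
--     part_num = 1
--     for j, blk in enumerate(blocks):
--         if j < len(blocks) - 1 and len(current) + len(blk) > max_lines:
--             parts.append((f'routes_part{part_num}', '\n'.join(current)))
--             current = []
--             part_num += 1
--         current.extend(blk)
--     if current:
--         parts.append((f'routes_part{part_num}', '\n'.join(current)))
--     return parts
-- ===== Notes on version B (the rewrite author's own statement) =====
-- stated objective: alternative
-- what changed: Replaces A's single interleaved loop with six pieces of mutable state (in_route flag, route_buffer, deferred flush) by a two-phase parse-then-pack: one pass splits the lines into preamble + explicit '@router.' blocks, a separate greedy-packing pass groups the blocks into parts.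
import Mathlib
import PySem

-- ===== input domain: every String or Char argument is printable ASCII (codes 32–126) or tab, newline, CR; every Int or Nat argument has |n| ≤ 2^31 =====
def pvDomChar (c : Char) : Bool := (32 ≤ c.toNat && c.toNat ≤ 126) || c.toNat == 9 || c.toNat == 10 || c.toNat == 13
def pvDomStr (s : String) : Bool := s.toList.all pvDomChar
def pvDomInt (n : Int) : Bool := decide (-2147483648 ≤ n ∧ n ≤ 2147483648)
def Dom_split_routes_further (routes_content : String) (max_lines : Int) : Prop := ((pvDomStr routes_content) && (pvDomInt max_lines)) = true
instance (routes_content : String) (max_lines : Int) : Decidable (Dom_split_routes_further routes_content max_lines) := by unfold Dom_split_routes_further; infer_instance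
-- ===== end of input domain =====

-- B replaces A's single interleaved loop (in_route flag / route_buffer / deferred flush) by a
-- two-phase parse-then-pack decomposition; objective: alternative (same O(n) cost).

-- shared helper: the test `line.strip().startswith('@router.')` (appears verbatim in both Pythons)
def pvIsMarker (l : String) : Bool := PySem.Str.startswith (PySem.Str.strip l) "@router."

-- f'routes_part{part_num}' (used verbatim by both Pythons)
def pvName (pn : Int) : String := "routes_part" ++ PySem.Int.toStr pn

-- ===== PORT A =====
-- loop state: (route_files, current_file, current_name, part_num, in_route, route_buffer)
def pvStateA := List (String × String) × List String × String × Int × Bool × List String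

def pvStepA (max_lines : Int) (s : pvStateA) (line : String) : pvStateA :=
  match s with
  | (rf, cf, nm, pn, inr, rb) =>
    if pvIsMarker line then
      -- if route_buffer and len(current_file) + len(route_buffer) > max_lines: flush
      let (rf, cf, nm, pn) :=
        if rb ≠ [] ∧ (cf.length : Int) + (rb.length : Int) > max_lines then
          (rf ++ [(nm, PySem.Str.join "\n" cf)], ([] : List String), pvName (pn + 1), pn + 1)
        else (rf, cf, nm, pn)
      -- if route_buffer: current_file.extend(route_buffer); route_buffer = []
      let (cf, rb) := if rb ≠ [] then (cf ++ rb, ([] : List String)) else (cf, rb)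
      -- in_route = True; then `if in_route:` appends line to route_buffer
      (rf, cf, nm, pn, true, rb ++ [line])
    else
      if inr then (rf, cf, nm, pn, inr, rb ++ [line])
      else (rf, cf ++ [line], nm, pn, inr, rb)

def split_routes_further (routes_content : String) (max_lines : Int) : List (String × String) :=
  let lines := (PySem.Str.split? routes_content "\n").getD []   -- sep "\n" ≠ "": never none
  if (lines.length : Int) ≤ max_lines then [("routes", routes_content)]
  else
    match lines.foldl (pvStepA max_lines) ([], [], "routes_part1", 1, false, []) with
    | (rf, cf, nm, _, _, rb) =>
      let cf := if rb ≠ [] then cf ++ rb else cf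
      if cf ≠ [] then rf ++ [(nm, PySem.Str.join "\n" cf)] else rf

-- ===== PORT B =====
-- phase 1a: the inner while loops — take lines up to (not including) the next marker
def pvTakePre : List String → List String × List String
  | [] => ([], [])
  | l :: rest =>
    if pvIsMarker l then ([], l :: rest)
    else
      let (p, r) := pvTakePre rest
      (l :: p, r)

theorem pvTakePre_len (ls : List String) : (pvTakePre ls).2.length ≤ ls.length := by
  induction ls with
  | nil => simp [pvTakePre]
  | cons l rest ih =>
    simp only [pvTakePre]
    split
    · simp
    · simpa using Nat.le_succ_of_le ih

-- phase 1b: one block per '@router.' line (the outer while loop)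
def pvParseBlocks : List String → List (List String)
  | [] => []
  | l :: rest =>
    (l :: (pvTakePre rest).1) :: pvParseBlocks (pvTakePre rest).2
  termination_by ls => ls.length
  decreasing_by exact Nat.lt_succ_of_le (pvTakePre_len rest)

-- phase 2: greedy packing; the last block is merged without a size check (as in Source B's
-- `j < len(blocks) - 1` test), the final `if current:` emit is the base case
def pvPack (max_lines : Int) : List (List String) → List String → Int → List (String × String) → List (String × String)
  | [], current, pn, parts =>
    if current ≠ [] then parts ++ [(pvName pn, PySem.Str.join "\n" current)] else parts
  | [blk], current, pn, parts => pvPack max_lines [] (current ++ blk) pn parts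
  | blk :: rest, current, pn, parts =>
    if (current.length : Int) + (blk.length : Int) > max_lines then
      pvPack max_lines rest blk (pn + 1) (parts ++ [(pvName pn, PySem.Str.join "\n" current)])
    else pvPack max_lines rest (current ++ blk) pn parts

def split_routes_further_alt (routes_content : String) (max_lines : Int) : List (String × String) :=
  let lines := (PySem.Str.split? routes_content "\n").getD []   -- sep "\n" ≠ "": never none
  if (lines.length : Int) ≤ max_lines then [("routes", routes_content)]
  else
    pvPack max_lines (pvParseBlocks (pvTakePre lines).2) (pvTakePre lines).1 1 []

-- ===== PRECONDITION & SPEC =====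
def Spec_split_routes_further (routes_content : String) (max_lines : Int) (out : List (String × String)) : Prop := out = split_routes_further_alt routes_content max_lines
instance (routes_content : String) (max_lines : Int) (out : List (String × String)) : Decidable (Spec_split_routes_further routes_content max_lines out) := by unfold Spec_split_routes_further; infer_instance

-- ===== CLAIM (what is proved, stated in full; the proofs are below) =====
def Claim_equal_split_routes_further : Prop := ∀ (routes_content : String) (max_lines : Int), Dom_split_routes_further routes_content max_lines → Spec_split_routes_further routes_content max_lines (split_routes_further routes_content max_lines)

-- ===== LEMMAS AND PROOFS =====

-- A's tail code after the loop, as a function of the final state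
def pvFinish (s : pvStateA) : List (String × String) :=
  let cf := if s.2.2.2.2.2 ≠ [] then s.2.1 ++ s.2.2.2.2.2 else s.2.1
  if cf ≠ [] then s.1 ++ [(s.2.2.1, PySem.Str.join "\n" cf)] else s.1

-- equation lemmas (pvParseBlocks / pvPack are compiled by well-founded recursion)
theorem pvParseBlocks_nil : pvParseBlocks [] = [] := by rw [pvParseBlocks]

theorem pvParseBlocks_cons (l : String) (rest : List String) :
    pvParseBlocks (l :: rest) = (l :: (pvTakePre rest).1) :: pvParseBlocks (pvTakePre rest).2 := by
  rw [pvParseBlocks]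

theorem pvPack_nil (max_lines : Int) (current : List String) (pn : Int) (parts : List (String × String)) :
    pvPack max_lines [] current pn parts =
      if current ≠ [] then parts ++ [(pvName pn, PySem.Str.join "\n" current)] else parts := by
  rw [pvPack]

theorem pvPack_single (max_lines : Int) (blk : List String) (current : List String) (pn : Int)
    (parts : List (String × String)) :
    pvPack max_lines [blk] current pn parts = pvPack max_lines [] (current ++ blk) pn parts := by
  conv_lhs => rw [pvPack]

theorem pvPack_cons₂ (max_lines : Int) (blk nxt : List String) (rest : List (List String))
    (current : List String) (pn : Int) (parts : List (String × String)) :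
    pvPack max_lines (blk :: nxt :: rest) current pn parts =
      if (current.length : Int) + (blk.length : Int) > max_lines then
        pvPack max_lines (nxt :: rest) blk (pn + 1) (parts ++ [(pvName pn, PySem.Str.join "\n" current)])
      else pvPack max_lines (nxt :: rest) (current ++ blk) pn parts := by
  rw [pvPack]
  simp

-- the remainder returned by pvTakePre is empty or starts with a marker line
theorem pvTakePre_snd (ls : List String) :
    (pvTakePre ls).2 = [] ∨
      ∃ m r', (pvTakePre ls).2 = m :: r' ∧ pvIsMarker m = true := by
  induction ls with
  | nil => left; rfl
  | cons l rest ih =>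
    simp only [pvTakePre]
    by_cases h : pvIsMarker l
    · right; exact ⟨l, rest, by simp [h], h⟩
    · simpa [h] using ih

-- A's loop before the first marker: preamble lines go straight to current_file
theorem foldA_pre (max_lines : Int) (ls : List String) (rf : List (String × String))
    (cf : List String) (nm : String) (pn : Int) :
    ls.foldl (pvStepA max_lines) (rf, cf, nm, pn, false, []) =
      (pvTakePre ls).2.foldl (pvStepA max_lines) (rf, cf ++ (pvTakePre ls).1, nm, pn, false, []) := by
  induction ls generalizing cf with
  | nil => simp [pvTakePre]
  | cons l rest ih =>
    by_cases h : pvIsMarker l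
    · simp [pvTakePre, h]
    · simp only [pvTakePre, h, Bool.false_eq_true, List.foldl_cons]
      have hs : pvStepA max_lines (rf, cf, nm, pn, false, []) l = (rf, cf ++ [l], nm, pn, false, []) := by
        simp [pvStepA, h]
      rw [hs, ih]
      simp

-- A's step at a marker line reached with an empty buffer
theorem stepA_marker_empty (max_lines : Int) (m : String) (h : pvIsMarker m = true)
    (rf : List (String × String)) (cf : List String) (nm : String) (pn : Int) :
    pvStepA max_lines (rf, cf, nm, pn, false, []) m = (rf, cf, nm, pn, true, [m]) := by
  simp [pvStepA, h]

-- A's step at a marker line with a nonempty buffer: flush-or-merge, buffer restarts at [m]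
theorem stepA_marker (max_lines : Int) (m : String) (h : pvIsMarker m = true)
    (rf : List (String × String)) (cf : List String) (pn : Int) (rb : List String) (hrb : rb ≠ [])
    (hc : (cf.length : Int) + (rb.length : Int) > max_lines) :
    pvStepA max_lines (rf, cf, pvName pn, pn, true, rb) m =
      (rf ++ [(pvName pn, PySem.Str.join "\n" cf)], rb, pvName (pn + 1), pn + 1, true, [m]) := by
  simp [pvStepA, h, hrb, hc]

theorem stepA_marker_merge (max_lines : Int) (m : String) (h : pvIsMarker m = true)
    (rf : List (String × String)) (cf : List String) (pn : Int) (rb : List String) (hrb : rb ≠ [])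
    (hc : ¬ ((cf.length : Int) + (rb.length : Int) > max_lines)) :
    pvStepA max_lines (rf, cf, pvName pn, pn, true, rb) m =
      (rf, cf ++ rb, pvName pn, pn, true, [m]) := by
  simp [pvStepA, h, hrb, hc]

-- A's loop inside a route: non-marker lines accumulate in route_buffer
theorem foldA_body (max_lines : Int) (ls : List String) (rf : List (String × String))
    (cf : List String) (nm : String) (pn : Int) (b : List String) :
    ls.foldl (pvStepA max_lines) (rf, cf, nm, pn, true, b) =
      (pvTakePre ls).2.foldl (pvStepA max_lines) (rf, cf, nm, pn, true, b ++ (pvTakePre ls).1) := by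
  induction ls generalizing b with
  | nil => simp [pvTakePre]
  | cons l rest ih =>
    by_cases h : pvIsMarker l
    · simp [pvTakePre, h]
    · simp only [pvTakePre, h, Bool.false_eq_true, List.foldl_cons]
      have hs : pvStepA max_lines (rf, cf, nm, pn, true, b) l = (rf, cf, nm, pn, true, b ++ [l]) := by
        simp [pvStepA, h]
      rw [hs, ih]
      simp

-- main invariant: A's loop from an in-route state computes B's pack over the parsed blocks
theorem foldA_main (max_lines : Int) (n : Nat) (ls : List String) (hn : ls.length ≤ n)
    (rf : List (String × String)) (cf : List String) (pn : Int) (b : List String) (hb : b ≠ []) :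
    pvFinish (ls.foldl (pvStepA max_lines) (rf, cf, pvName pn, pn, true, b)) =
      pvPack max_lines ((b ++ (pvTakePre ls).1) :: pvParseBlocks (pvTakePre ls).2) cf pn rf := by
  induction n generalizing ls rf cf pn b with
  | zero =>
    have hls : ls = [] := List.eq_nil_of_length_eq_zero (Nat.le_zero.mp hn)
    subst hls
    simp [pvTakePre, pvParseBlocks_nil, pvPack_single, pvPack_nil, pvFinish, hb]
  | succ n ih =>
    rw [foldA_body]
    have hbp : b ++ (pvTakePre ls).1 ≠ [] := by simp [hb]
    rcases pvTakePre_snd ls with h2 | ⟨m, r', h2, hm⟩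
    · -- no further marker: the buffer is flushed into current_file at the end
      rw [h2]
      simp [pvParseBlocks_nil, pvPack_single, pvPack_nil, pvFinish, hbp]
    · -- next marker m: A flushes/merges exactly as pvPack's non-last branch does
      rw [h2]
      simp only [List.foldl_cons]
      have hr' : r'.length ≤ n := by
        have h1 := pvTakePre_len ls
        rw [h2] at h1
        simp only [List.length_cons] at h1
        omega
      have hone : ([m] : List String) ≠ [] := by simp
      rw [pvParseBlocks_cons, pvPack_cons₂]
      by_cases hc : (cf.length : Int) + ((b ++ (pvTakePre ls).1).length : Int) > max_lines
      · rw [stepA_marker max_lines m hm rf cf pn _ hbp hc,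
           ih r' hr' _ _ _ _ hone, if_pos hc]
        simp
      · rw [stepA_marker_merge max_lines m hm rf cf pn _ hbp hc,
           ih r' hr' _ _ _ _ hone, if_neg hc]
        simp

-- ===== VERDICT (by name: the statement is the Claim_ definition above) =====
theorem split_routes_further_spec : Claim_equal_split_routes_further := by
  intro routes_content max_lines _
  unfold Spec_split_routes_further split_routes_further split_routes_further_alt
  set lines := (PySem.Str.split? routes_content "\n").getD [] with hlines
  by_cases hlen : (lines.length : Int) ≤ max_lines
  · simp [hlen]
  · rw [if_neg hlen, if_neg hlen]
    have hA : ∀ s : pvStateA,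
        (match s with
          | (rf, cf, nm, _, _, rb) =>
            let cf := if rb ≠ [] then cf ++ rb else cf
            if cf ≠ [] then rf ++ [(nm, PySem.Str.join "\n" cf)] else rf) = pvFinish s := by
      rintro ⟨rf, cf, nm, pn, inr, rb⟩
      simp [pvFinish]
    rw [hA]
    have hname : ("routes_part1" : String) = pvName 1 := by decide
    rw [hname, foldA_pre]
    rcases pvTakePre_snd lines with h2 | ⟨m, r', h2, hm⟩
    · rw [h2]
      simp [pvParseBlocks_nil, pvPack_nil, pvFinish]
    · rw [h2]
      simp only [List.foldl_cons, List.nil_append]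
      rw [stepA_marker_empty max_lines m hm,
         foldA_main max_lines r'.length r' le_rfl _ _ _ _ (by simp),
         pvParseBlocks_cons, List.singleton_append]
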